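-- pv_equiv track=rewrite | github.com/SayaliDeore22/Practice-Code | GFG/check vowels.py | check_vowels
-- ===== SOURCE A (Python) =====
-- def check_vowels(sample):
--     s = sample.lower()
--     vowels = set("aeiou")
--     res = set({})
--
--     for i in s:
--         if i in vowels:
--             res.add(i)
--         else:
--             pass
--     if len(vowels) == len(res):
--         return "Accepted"
--     else:
--         return "Not Accepted"
-- ===== SOURCE B (Python) =====
-- def check_vowels(sample):
--     s = sample.lower()
--     return "Accepted" if all(v in s for v in "aeiou") else "Not Accepted"
-- ===== Notes on version B (the rewrite author's own statement) =====
-- stated objective: idiomatic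
-- what changed: B loops over the fixed five-vowel alphabet with short-circuiting substring membership tests in the lowered string instead of scanning the input character by character while accumulating a result set and comparing set sizes.
import Mathlib
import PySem

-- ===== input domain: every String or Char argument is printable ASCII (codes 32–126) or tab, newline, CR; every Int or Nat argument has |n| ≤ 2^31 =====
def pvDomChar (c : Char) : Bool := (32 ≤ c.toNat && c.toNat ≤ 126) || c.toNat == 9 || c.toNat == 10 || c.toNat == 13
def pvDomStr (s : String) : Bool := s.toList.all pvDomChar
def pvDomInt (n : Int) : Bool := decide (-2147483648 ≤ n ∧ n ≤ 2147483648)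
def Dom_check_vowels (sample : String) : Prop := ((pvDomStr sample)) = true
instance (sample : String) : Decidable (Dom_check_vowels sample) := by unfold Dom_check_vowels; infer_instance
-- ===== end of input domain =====

-- B checks each of the five vowels for membership in the lowered string instead of
-- collecting encountered vowels into a set and comparing set sizes (idiomatic rewrite).

-- ===== PORT A =====
def check_vowels (sample : String) : String :=
  let s := PySem.Str.lower sample
  let vowels : PySem.Set Char := PySem.Set.ofList "aeiou".toList
  let res : PySem.Set Char :=
    s.toList.foldl (fun r i =>
      if PySem.Set.contains vowels i then PySem.Set.add r i else r) PySem.Set.empty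
  if PySem.Set.len vowels == PySem.Set.len res then "Accepted" else "Not Accepted"

-- ===== PORT B =====
def check_vowels_alt (sample : String) : String :=
  let s := PySem.Str.lower sample
  if "aeiou".toList.all (fun v => PySem.Str.isIn (String.ofList [v]) s) then "Accepted"
  else "Not Accepted"

-- ===== PRECONDITION & SPEC =====
def Spec_check_vowels (sample : String) (out : String) : Prop := out = check_vowels_alt sample
instance (sample : String) (out : String) : Decidable (Spec_check_vowels sample out) := by unfold Spec_check_vowels; infer_instance

-- ===== CLAIM (what is proved, stated in full; the proofs are below) =====
def Claim_equal_check_vowels : Prop := ∀ (sample : String), Dom_check_vowels sample → Spec_check_vowels sample (check_vowels sample)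

-- ===== LEMMAS AND PROOFS =====

-- membership in A's accumulating fold
theorem pv_mem_fold (V : PySem.Set Char) (l : List Char) (r : PySem.Set Char) (x : Char) :
    x ∈ l.foldl (fun r i => if PySem.Set.contains V i then PySem.Set.add r i else r) r ↔
      x ∈ r ∨ (x ∈ l ∧ x ∈ V) := by
  induction l generalizing r with
  | nil => simp
  | cons c t ih =>
    simp only [List.foldl_cons]
    by_cases hc : PySem.Set.contains V c
    · rw [if_pos hc, ih]
      rw [PySem.Set.contains_iff] at hc
      simp only [PySem.Set.mem_add, List.mem_cons]
      constructor
      · rintro (⟨h | h⟩ | ⟨h1, h2⟩)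
        · exact Or.inl h
        · exact Or.inr ⟨Or.inl h, h ▸ hc⟩
        · exact Or.inr ⟨Or.inr h1, h2⟩
      · rintro (h | ⟨h1 | h1, h2⟩)
        · exact Or.inl (Or.inl h)
        · exact Or.inl (Or.inr h1)
        · exact Or.inr ⟨h1, h2⟩
    · rw [if_neg hc, ih]
      rw [PySem.Set.contains_iff] at hc
      simp only [List.mem_cons]
      constructor
      · rintro (h | ⟨h1, h2⟩)
        · exact Or.inl h
        · exact Or.inr ⟨Or.inr h1, h2⟩
      · rintro (h | ⟨h1 | h1, h2⟩)
        · exact Or.inl h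
        · exact absurd (h1 ▸ h2) hc
        · exact Or.inr ⟨h1, h2⟩

theorem pv_nodup_fold (V : PySem.Set Char) (l : List Char) (r : PySem.Set Char)
    (h : r.Nodup) :
    (l.foldl (fun r i => if PySem.Set.contains V i then PySem.Set.add r i else r) r).Nodup := by
  induction l generalizing r with
  | nil => exact h
  | cons c t ih =>
    simp only [List.foldl_cons]
    by_cases hc : PySem.Set.contains V c
    · rw [if_pos hc]; exact ih _ (PySem.Set.nodup_add r c h)
    · rw [if_neg hc]; exact ih _ h

-- singleton substring membership is character membership
theorem pv_isIn_singleton (v : Char) (l : List Char) :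
    PySem.Chars.isIn [v] l = true ↔ v ∈ l := by
  rw [PySem.Chars.isIn_iff_infix]
  constructor
  · intro h; exact h.subset (List.mem_singleton_self v)
  · intro h
    obtain ⟨l1, l2, rfl⟩ := List.append_of_mem h
    exact ⟨l1, l2, by simp⟩

-- ===== VERDICT (by name: the statement is the Claim_ definition above) =====
theorem check_vowels_spec : Claim_equal_check_vowels := by
  intro sample _
  unfold Spec_check_vowels check_vowels check_vowels_alt
  simp only []
  set l := (PySem.Str.lower sample).toList with hl
  set V : PySem.Set Char := PySem.Set.ofList "aeiou".toList with hV
  set res := l.foldl (fun r i => if PySem.Set.contains V i then PySem.Set.add r i else r)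
      PySem.Set.empty with hres
  have hmem : ∀ x, x ∈ res ↔ x ∈ l ∧ x ∈ V := by
    intro x
    rw [hres, pv_mem_fold]
    simp [PySem.Set.empty]
  have hnd : res.Nodup := pv_nodup_fold V l PySem.Set.empty (by simp [PySem.Set.empty])
  have hVval : V = ['a', 'e', 'i', 'o', 'u'] := by decide
  have hsub : res ⊆ V := fun x hx => ((hmem x).1 hx).2
  -- length-5 characterisation via Finsets
  have hres5 : res.length = 5 ↔ ∀ v ∈ (['a', 'e', 'i', 'o', 'u'] : List Char), v ∈ res := by
    have hcard : res.length = res.toFinset.card := (List.toFinset_card_of_nodup hnd).symm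
    have hFW : res.toFinset ⊆ (['a', 'e', 'i', 'o', 'u'] : List Char).toFinset := by
      intro x hx
      rw [List.mem_toFinset] at hx ⊢
      have := hsub hx
      rwa [hVval] at this
    have hWcard : (['a', 'e', 'i', 'o', 'u'] : List Char).toFinset.card = 5 := by decide
    constructor
    · intro h5 v hv
      have heq : res.toFinset = (['a', 'e', 'i', 'o', 'u'] : List Char).toFinset :=
        Finset.eq_of_subset_of_card_le hFW (by omega)
      rw [← List.mem_toFinset, heq, List.mem_toFinset]
      exact hv
    · intro hall
      have hWF : (['a', 'e', 'i', 'o', 'u'] : List Char).toFinset ⊆ res.toFinset := by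
        intro x hx
        rw [List.mem_toFinset] at hx ⊢
        exact hall x hx
      have h1 := Finset.card_le_card hFW
      have h2 := Finset.card_le_card hWF
      omega
  have hlen : (PySem.Set.len V == PySem.Set.len res) = true ↔ res.length = 5 := by
    rw [beq_iff_eq]
    simp only [PySem.Set.len, hVval, List.length_cons, List.length_nil]
    constructor
    · intro h; omega
    · intro h; rw [h]
  have hae : "aeiou".toList = (['a', 'e', 'i', 'o', 'u'] : List Char) := by decide
  have hsm : ∀ v : Char, (String.ofList [v]).toList = [v] := fun v => by simp
  have hallB : ("aeiou".toList.all fun v => PySem.Str.isIn (String.ofList [v]) (PySem.Str.lower sample)) = true ↔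
      ∀ v ∈ (['a', 'e', 'i', 'o', 'u'] : List Char), v ∈ l := by
    rw [List.all_eq_true, hae]
    constructor
    · intro h v hv
      have := h v hv
      rw [PySem.Str.isIn_eq, hsm, pv_isIn_singleton] at this
      simpa [hl] using this
    · intro h v hv
      rw [PySem.Str.isIn_eq, hsm, pv_isIn_singleton]
      have := h v hv
      rw [hl] at this
      simpa using this
  have hAB : (PySem.Set.len V == PySem.Set.len res) = true ↔
      ("aeiou".toList.all fun v => PySem.Str.isIn (String.ofList [v]) (PySem.Str.lower sample)) = true := by
    rw [hlen, hres5, hallB]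
    constructor
    · intro h v hv; exact ((hmem v).1 (h v hv)).1
    · intro h v hv
      refine (hmem v).2 ⟨h v hv, ?_⟩
      rw [hVval]
      exact hv
  by_cases hc : (PySem.Set.len V == PySem.Set.len res) = true
  · rw [if_pos hc, if_pos (hAB.1 hc)]
  · rw [if_neg hc, if_neg (fun h => hc (hAB.2 h))]
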